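-- pv_equiv track=rewrite | github.com/Ankitab1946/metadata-driven-testing-framework | utils/db_connector.py | _compare_data_types
-- ===== SOURCE A (Python) =====
-- def _compare_data_types(actual_type: str, expected_type: str) -> bool:
--     """Compare actual and expected data types"""
--     # Normalize type names for comparison
--     type_mappings = {
--         'VARCHAR': ['VARCHAR', 'NVARCHAR', 'TEXT', 'STRING'],
--         'INTEGER': ['INTEGER', 'INT', 'BIGINT', 'SMALLINT'],
--         'DECIMAL': ['DECIMAL', 'NUMERIC', 'FLOAT', 'REAL'],
--         'DATETIME': ['DATETIME', 'TIMESTAMP', 'DATE', 'TIME'],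
--         'BOOLEAN': ['BOOLEAN', 'BIT']
--     }
--
--     for standard_type, variants in type_mappings.items():
--         if any(variant in actual_type for variant in variants) and any(variant in expected_type for variant in variants):
--             return True
--
--     return actual_type == expected_type
-- ===== SOURCE B (Python) =====
-- def _compare_data_types(actual_type: str, expected_type: str) -> bool:
--     """Compare actual and expected data types"""
--     # flat variant -> group-bit table; one pass accumulating a bitmask per side
--     variant_bits = [
--         ('VARCHAR', 1), ('NVARCHAR', 1), ('TEXT', 1), ('STRING', 1),
--         ('INTEGER', 2), ('INT', 2), ('BIGINT', 2), ('SMALLINT', 2),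
--         ('DECIMAL', 4), ('NUMERIC', 4), ('FLOAT', 4), ('REAL', 4),
--         ('DATETIME', 8), ('TIMESTAMP', 8), ('DATE', 8), ('TIME', 8),
--         ('BOOLEAN', 16), ('BIT', 16),
--     ]
--     mask_a = 0
--     mask_b = 0
--     for variant, bit in variant_bits:
--         if variant in actual_type:
--             mask_a |= bit
--         if variant in expected_type:
--             mask_b |= bit
--     return (mask_a & mask_b) != 0 or actual_type == expected_type
-- ===== Notes on version B (the rewrite author's own statement) =====
-- stated objective: alternative
-- what changed: B replaces A's per-group loop (checking both sides against each group's variant list and early-returning) with a flat variant->group-bit table traversed once, accumulating one bitmask per string, and decides membership in a common group by bitwise AND of the two masks (same exact-equality fallback).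
import Mathlib
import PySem

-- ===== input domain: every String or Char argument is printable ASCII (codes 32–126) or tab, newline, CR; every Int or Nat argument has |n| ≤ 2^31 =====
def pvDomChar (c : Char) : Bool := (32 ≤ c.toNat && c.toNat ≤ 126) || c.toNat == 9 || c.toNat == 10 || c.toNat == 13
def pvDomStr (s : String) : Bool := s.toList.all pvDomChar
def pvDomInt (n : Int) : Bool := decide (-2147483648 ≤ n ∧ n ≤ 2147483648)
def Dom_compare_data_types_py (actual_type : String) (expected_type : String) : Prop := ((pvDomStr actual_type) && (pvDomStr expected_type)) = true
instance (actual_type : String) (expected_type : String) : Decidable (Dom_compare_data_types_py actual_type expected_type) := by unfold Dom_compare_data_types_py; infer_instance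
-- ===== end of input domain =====

-- B replaces A's per-group both-sides loop by a single pass over a flat variant->group-bit table,
-- accumulating one bitmask per string, then tests the bitwise AND of the masks (objective: alternative).

-- ===== PORT A =====
-- the literal type_mappings dict of A
def cdtMappings : List (String × List String) :=
  [("VARCHAR", ["VARCHAR", "NVARCHAR", "TEXT", "STRING"]),
   ("INTEGER", ["INTEGER", "INT", "BIGINT", "SMALLINT"]),
   ("DECIMAL", ["DECIMAL", "NUMERIC", "FLOAT", "REAL"]),
   ("DATETIME", ["DATETIME", "TIMESTAMP", "DATE", "TIME"]),
   ("BOOLEAN", ["BOOLEAN", "BIT"])]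

-- A's 'for standard_type, variants in type_mappings.items()' loop with its early return
def cdtLoopA (actual_type expected_type : String) : List (String × List String) → Bool
  | [] => actual_type == expected_type
  | (_, variants) :: rest =>
    if variants.any (fun v => PySem.Str.isIn v actual_type)
        && variants.any (fun v => PySem.Str.isIn v expected_type) then true
    else cdtLoopA actual_type expected_type rest

def compare_data_types_py (actual_type : String) (expected_type : String) : Bool :=
  cdtLoopA actual_type expected_type cdtMappings

-- ===== PORT B =====
-- the flat variant -> group-bit table of Source B
def cdtTable : List (String × Nat) :=
  [("VARCHAR", 1), ("NVARCHAR", 1), ("TEXT", 1), ("STRING", 1),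
   ("INTEGER", 2), ("INT", 2), ("BIGINT", 2), ("SMALLINT", 2),
   ("DECIMAL", 4), ("NUMERIC", 4), ("FLOAT", 4), ("REAL", 4),
   ("DATETIME", 8), ("TIMESTAMP", 8), ("DATE", 8), ("TIME", 8),
   ("BOOLEAN", 16), ("BIT", 16)]

-- the single loop accumulating (mask_a, mask_b)
def cdtMasks (actual_type expected_type : String) : Nat × Nat :=
  cdtTable.foldl
    (fun m p =>
      (if PySem.Str.isIn p.1 actual_type then m.1 ||| p.2 else m.1,
       if PySem.Str.isIn p.1 expected_type then m.2 ||| p.2 else m.2))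
    (0, 0)

def compare_data_types_py_alt (actual_type : String) (expected_type : String) : Bool :=
  (let m := cdtMasks actual_type expected_type
   decide (m.1 &&& m.2 ≠ 0)) || actual_type == expected_type

-- ===== PRECONDITION & SPEC =====
def Spec_compare_data_types_py (actual_type : String) (expected_type : String) (out : Bool) : Prop := out = compare_data_types_py_alt actual_type expected_type
instance (actual_type : String) (expected_type : String) (out : Bool) : Decidable (Spec_compare_data_types_py actual_type expected_type out) := by unfold Spec_compare_data_types_py; infer_instance

-- ===== CLAIM (what is proved, stated in full; the proofs are below) =====
def Claim_equal_compare_data_types_py : Prop := ∀ (actual_type : String) (expected_type : String), Dom_compare_data_types_py actual_type expected_type → Spec_compare_data_types_py actual_type expected_type (compare_data_types_py actual_type expected_type)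

-- ===== LEMMAS AND PROOFS =====

-- one fold step of B, per side
def cdtStep (s : String) (m : Nat) (p : String × Nat) : Nat :=
  if PySem.Str.isIn p.1 s then m ||| p.2 else m

-- the nested-if bitmask a one-sided fold of B produces, as a function of the five group conditions
def cdtMaskOf (A1 A2 A3 A4 A5 : Bool) : Nat :=
  let m1 := if A1 then 0 ||| 1 else 0
  let m2 := if A2 then m1 ||| 2 else m1
  let m3 := if A3 then m2 ||| 4 else m2
  let m4 := if A4 then m3 ||| 8 else m3
  if A5 then m4 ||| 16 else m4

-- the paired fold is the pair of the two one-sided folds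
theorem cdtMasks_split (l : List (String × Nat)) (a e : String) (m1 m2 : Nat) :
    l.foldl
      (fun m p =>
        (if PySem.Str.isIn p.1 a then m.1 ||| p.2 else m.1,
         if PySem.Str.isIn p.1 e then m.2 ||| p.2 else m.2)) (m1, m2)
    = (l.foldl (cdtStep a) m1, l.foldl (cdtStep e) m2) := by
  induction l generalizing m1 m2 with
  | nil => rfl
  | cons p t ih =>
    simp only [List.foldl]
    rw [ih]
    rfl

-- folding one group (all variants carry the same bit b) sets bit b iff some variant occurs
theorem cdtFold_group (s : String) (b m : Nat) (vs : List String) :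
    (vs.map (fun v => (v, b))).foldl (cdtStep s) m
    = if vs.any (fun v => PySem.Str.isIn v s) then m ||| b else m := by
  induction vs generalizing m with
  | nil => rfl
  | cons v t ih =>
    simp only [List.map, List.foldl, List.any_cons, cdtStep]
    rw [ih]
    rcases Bool.dichotomy (PySem.Str.isIn v s) with hv | hv <;>
      rcases Bool.dichotomy (t.any fun v => PySem.Str.isIn v s) with ht | ht <;>
      simp only [hv, ht, Bool.false_or, Bool.true_or] <;> simp

-- cdtTable grouped by bit
theorem cdtTable_grouped : cdtTable
    = (["VARCHAR", "NVARCHAR", "TEXT", "STRING"].map (fun v => (v, 1)))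
      ++ (["INTEGER", "INT", "BIGINT", "SMALLINT"].map (fun v => (v, 2)))
      ++ (["DECIMAL", "NUMERIC", "FLOAT", "REAL"].map (fun v => (v, 4)))
      ++ (["DATETIME", "TIMESTAMP", "DATE", "TIME"].map (fun v => (v, 8)))
      ++ (["BOOLEAN", "BIT"].map (fun v => (v, 16))) := by rfl

-- the boolean/bitmask bridge: A's early-return chain equals B's mask intersection test
theorem cdt_key (A1 A2 A3 A4 A5 B1 B2 B3 B4 B5 q : Bool) :
    (if (A1 && B1) = true then true
     else if (A2 && B2) = true then true
     else if (A3 && B3) = true then true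
     else if (A4 && B4) = true then true
     else if (A5 && B5) = true then true
     else q)
    = (decide (cdtMaskOf A1 A2 A3 A4 A5 &&& cdtMaskOf B1 B2 B3 B4 B5 ≠ 0) || q) := by
  revert A1 A2 A3 A4 A5 B1 B2 B3 B4 B5 q
  decide

-- ===== VERDICT (by name: the statement is the Claim_ definition above) =====
theorem compare_data_types_py_spec : Claim_equal_compare_data_types_py := by
  intro a e _
  unfold Spec_compare_data_types_py compare_data_types_py compare_data_types_py_alt cdtMasks
  rw [cdtTable_grouped, cdtMasks_split]
  simp only [List.foldl_append, cdtFold_group, cdtMappings, cdtLoopA, List.any_cons, List.any_nil]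
  exact cdt_key _ _ _ _ _ _ _ _ _ _ _
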